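-- pv_equiv track=rewrite | github.com/Darkkyelfo/Tetris-PyQt | Agente.py | numBuracos
-- ===== SOURCE A (Python) =====
-- def numBuracos(campo):
--     buracos=0
--     for linha in campo:
--         ehZero=False
--         for j in linha:
--             if(j==0):
--                 ehZero=True
--             else:
--                 if(ehZero):
--                     buracos+=1
--                     ehZero=False
--     return buracos
-- ===== SOURCE B (Python) =====
-- def numBuracos(campo):
--     return sum(a == 0 and b != 0 for linha in campo for a, b in zip(linha, linha[1:]))
-- ===== Notes on version B (the rewrite author's own statement) =====
-- stated objective: simpler
-- what changed: Replaces the stateful ehZero-flag scan with a one-line count of zero->nonzero adjacent pairs (zip of each row with its tail), summed across rows.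
import Mathlib
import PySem

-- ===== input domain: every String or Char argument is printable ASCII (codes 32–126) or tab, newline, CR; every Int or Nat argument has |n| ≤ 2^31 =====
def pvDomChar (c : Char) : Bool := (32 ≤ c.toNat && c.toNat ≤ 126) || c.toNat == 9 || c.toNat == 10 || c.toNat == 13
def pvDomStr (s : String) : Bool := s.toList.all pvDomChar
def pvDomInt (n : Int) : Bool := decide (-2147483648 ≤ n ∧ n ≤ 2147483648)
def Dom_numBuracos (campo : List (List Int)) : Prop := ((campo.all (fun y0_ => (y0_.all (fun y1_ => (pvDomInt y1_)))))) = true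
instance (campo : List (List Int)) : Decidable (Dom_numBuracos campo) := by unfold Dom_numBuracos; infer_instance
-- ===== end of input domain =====

-- B counts zero->nonzero adjacent pairs per row instead of A's ehZero-flag scan; objective: simpler.


-- ===== PORT A =====
-- inner loop body: state (buracos, ehZero)
def numBuracosStep (s : Int × Bool) (j : Int) : Int × Bool :=
  if j = 0 then (s.1, true)
  else if s.2 then (s.1 + 1, false) else s

def numBuracos (campo : List (List Int)) : Int :=
  campo.foldl (fun buracos linha => (linha.foldl numBuracosStep (buracos, false)).1) 0

-- ===== PORT B =====
def numBuracos_alt (campo : List (List Int)) : Int :=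
  (campo.flatMap (fun linha => linha.zip linha.tail)).foldl
    (fun s p => s + (if p.1 = 0 ∧ p.2 ≠ 0 then 1 else 0)) 0

-- ===== PRECONDITION & SPEC =====
def Spec_numBuracos (campo : List (List Int)) (out : Int) : Prop := out = numBuracos_alt campo
instance (campo : List (List Int)) (out : Int) : Decidable (Spec_numBuracos campo out) := by unfold Spec_numBuracos; infer_instance

-- ===== CLAIM (what is proved, stated in full; the proofs are below) =====
def Claim_equal_numBuracos : Prop := ∀ (campo : List (List Int)), Dom_numBuracos campo → Spec_numBuracos campo (numBuracos campo)

-- ===== LEMMAS AND PROOFS =====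

-- recursive characterisation of A's inner loop count starting with flag f
def cntA (f : Bool) : List Int → Int
  | [] => 0
  | j :: t => if j = 0 then cntA true t else (if f then 1 else 0) + cntA false t

theorem foldl_step_fst (l : List Int) (b : Int) (f : Bool) :
    (l.foldl numBuracosStep (b, f)).1 = b + cntA f l := by
  induction l generalizing b f with
  | nil => simp [cntA]
  | cons j t ih =>
    by_cases hj : j = 0
    · simp [List.foldl, numBuracosStep, hj, cntA, ih]
    · cases f <;> simp [List.foldl, numBuracosStep, hj, cntA, ih] <;> ring

-- B's pair count of one row
def pcB (l : List Int) : Int :=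
  (l.zip l.tail).foldl (fun s p => s + (if p.1 = 0 ∧ p.2 ≠ 0 then 1 else 0)) 0

theorem foldl_pairs_shift (l : List (Int × Int)) (b : Int) :
    l.foldl (fun s p => s + (if p.1 = 0 ∧ p.2 ≠ 0 then 1 else 0)) b
      = b + l.foldl (fun s p => s + (if p.1 = 0 ∧ p.2 ≠ 0 then 1 else 0)) 0 := by
  induction l generalizing b with
  | nil => simp
  | cons p t ih => simp only [List.foldl]; rw [ih, ih (0 + _)]; ring

theorem pcB_cons (a b : Int) (u : List Int) :
    pcB (a :: b :: u) = (if a = 0 ∧ b ≠ 0 then 1 else 0) + pcB (b :: u) := by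
  simp only [pcB, List.tail, List.zip, List.zipWith, List.foldl]
  rw [foldl_pairs_shift]
  ring

theorem cntA_eq_pcB (f : Bool) (l : List Int) :
    cntA f l = pcB l + (match l with | [] => 0 | j :: _ => if f ∧ j ≠ 0 then 1 else 0) := by
  induction l generalizing f with
  | nil => simp [cntA, pcB]
  | cons j t ih =>
    by_cases hj : j = 0
    · subst hj
      cases t with
      | nil => cases f <;> simp [cntA, pcB]
      | cons k u =>
        have h1 : cntA f (0 :: k :: u) = cntA true (k :: u) := by simp [cntA]
        rw [h1, ih true, pcB_cons]
        by_cases hk : k = 0 <;> cases f <;> simp [hk] <;> ring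
    · cases t with
      | nil => cases f <;> simp [cntA, pcB, hj]
      | cons k u =>
        have h1 : cntA f (j :: k :: u) = (if f then 1 else 0) + cntA false (k :: u) := by
          simp [cntA, hj]
        rw [h1, ih false, pcB_cons]
        cases f <;> simp [hj] <;> ring

theorem cntA_false_eq (l : List Int) : cntA false l = pcB l := by
  rw [cntA_eq_pcB]; cases l <;> simp

theorem alt_eq (campo : List (List Int)) (b : Int) :
    (campo.flatMap (fun linha => linha.zip linha.tail)).foldl
      (fun s p => s + (if p.1 = 0 ∧ p.2 ≠ 0 then 1 else 0)) b
    = campo.foldl (fun s linha => s + pcB linha) b := by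
  induction campo generalizing b with
  | nil => simp
  | cons l t ih =>
    simp only [List.flatMap_cons, List.foldl_append, List.foldl]
    rw [foldl_pairs_shift _ b, ih]
    rfl

theorem a_eq (campo : List (List Int)) :
    numBuracos campo = campo.foldl (fun s linha => s + pcB linha) 0 := by
  unfold numBuracos
  induction campo using List.reverseRecOn with
  | nil => rfl
  | append_singleton t l ih =>
    simp only [List.foldl_append, List.foldl]
    rw [ih, foldl_step_fst, cntA_false_eq]

-- ===== VERDICT (by name: the statement is the Claim_ definition above) =====
theorem numBuracos_spec : Claim_equal_numBuracos := by
  intro campo _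
  unfold Spec_numBuracos numBuracos_alt
  rw [alt_eq, a_eq]
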